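-- pv_equiv track=rewrite | github.com/johnsonjh/font-multics-gct | convert_gct_outline.py | get_glyph_chunks
-- ===== SOURCE A (Python) =====
-- def get_glyph_chunks(lines):
--     chunks = []
--     current_chunk = []
--     for line in lines:
--         stripped = line.strip()
--         if stripped and stripped.endswith(":") and not stripped.startswith("metric"):
--             if current_chunk:
--                 chunks.append(current_chunk)
--             current_chunk = [line]
--         elif current_chunk:
--             current_chunk.append(line)
--     if current_chunk:
--         chunks.append(current_chunk)
--     return chunks
-- ===== SOURCE B (Python) =====
-- def get_glyph_chunks(lines):
--     def is_header(line):
--         s = line.strip()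
--         return bool(s) and s.endswith(":") and not s.startswith("metric")
--     idx = [i for i, line in enumerate(lines) if is_header(line)]
--     if not idx:
--         return []
--     bounds = idx + [len(lines)]
--     return [lines[a:b] for a, b in zip(bounds, bounds[1:])]
-- ===== Notes on version B (the rewrite author's own statement) =====
-- stated objective: alternative
-- what changed: Replaced A's single stateful pass (accumulating a current_chunk and flushing it at each header) by a two-phase decomposition: one pass collecting the header line indices, then building each chunk as a slice of lines between consecutive header indices (with len(lines) as sentinel).
import Mathlib
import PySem

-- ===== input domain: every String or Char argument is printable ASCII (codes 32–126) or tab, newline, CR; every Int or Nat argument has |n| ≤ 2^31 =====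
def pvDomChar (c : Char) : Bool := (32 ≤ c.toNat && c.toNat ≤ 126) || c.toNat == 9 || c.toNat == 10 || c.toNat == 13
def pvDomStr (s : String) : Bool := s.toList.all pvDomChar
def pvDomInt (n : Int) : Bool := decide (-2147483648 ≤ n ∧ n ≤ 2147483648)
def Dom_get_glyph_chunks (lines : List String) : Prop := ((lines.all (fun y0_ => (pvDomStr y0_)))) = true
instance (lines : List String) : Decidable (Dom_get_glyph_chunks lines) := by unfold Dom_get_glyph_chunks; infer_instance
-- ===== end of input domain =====

-- B replaces A's stateful accumulator loop by a two-phase decomposition: collect header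
-- indices in one pass, then build the chunks by slicing between consecutive indices
-- (objective: alternative; same asymptotic cost).


-- ===== PORT A =====
-- one fold over the lines carrying (chunks, current_chunk), then a final flush
def ghcStep (st : List (List String) × List String) (line : String) : List (List String) × List String :=
  let stripped := PySem.Str.strip line
  if stripped != "" && PySem.Str.endswith stripped ":" && !(PySem.Str.startswith stripped "metric") then
    ((if st.2.isEmpty then st.1 else st.1 ++ [st.2]), [line])
  else if !st.2.isEmpty then (st.1, st.2 ++ [line])
  else st

def get_glyph_chunks (lines : List String) : List (List String) :=
  let res := lines.foldl ghcStep ([], [])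
  if res.2.isEmpty then res.1 else res.1 ++ [res.2]

-- ===== PORT B =====
def isHeader (line : String) : Bool :=
  let s := PySem.Str.strip line
  s != "" && PySem.Str.endswith s ":" && !(PySem.Str.startswith s "metric")

def get_glyph_chunks_alt (lines : List String) : List (List String) :=
  let idx := (PySem.List.enumerate lines).filterMap (fun p => if isHeader p.2 then some p.1 else none)
  if idx.isEmpty then []
  else
    let bounds := idx ++ [(lines.length : Int)]
    (bounds.zip bounds.tail).map (fun p => PySem.List.slice lines (some p.1) (some p.2))

-- ===== PRECONDITION & SPEC =====
def Spec_get_glyph_chunks (lines : List String) (out : List (List String)) : Prop := out = get_glyph_chunks_alt lines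
instance (lines : List String) (out : List (List String)) : Decidable (Spec_get_glyph_chunks lines out) := by unfold Spec_get_glyph_chunks; infer_instance

-- ===== CLAIM (what is proved, stated in full; the proofs are below) =====
def Claim_equal_get_glyph_chunks : Prop := ∀ (lines : List String), Dom_get_glyph_chunks lines → Spec_get_glyph_chunks lines (get_glyph_chunks lines)

-- ===== LEMMAS AND PROOFS =====

-- intermediate recursive specification: split at header lines
def splitS : List String → List (List String)
  | [] => []
  | l :: t =>
    if isHeader l then
      (l :: t.takeWhile (fun x => !isHeader x)) :: splitS (t.dropWhile (fun x => !isHeader x))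
    else splitS t
termination_by ls => ls.length
decreasing_by
  · simpa using Nat.lt_succ_of_le (t.length_dropWhile_le _)
  · simp

lemma splitS_dropWhile (t : List String) :
    splitS (t.dropWhile (fun x => !isHeader x)) = splitS t := by
  induction t with
  | nil => simp
  | cons l t ih =>
    by_cases h : isHeader l
    · simp [h]
    · rw [List.dropWhile_cons]
      simp only [h, Bool.not_false, if_true]
      rw [ih, splitS]
      simp [h]

-- A equals splitS -----------------------------------------------------------

lemma ghcStep_header (st : List (List String) × List String) (line : String)
    (h : isHeader line = true) :
    ghcStep st line = ((if st.2.isEmpty then st.1 else st.1 ++ [st.2]), [line]) := by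
  simp only [isHeader] at h
  simp only [ghcStep]
  rw [h]
  simp

lemma ghcStep_nonheader (st : List (List String) × List String) (line : String)
    (h : isHeader line = false) :
    ghcStep st line = if st.2.isEmpty then st else (st.1, st.2 ++ [line]) := by
  simp only [isHeader] at h
  simp only [ghcStep]
  rw [h]
  by_cases hc : st.2.isEmpty <;> simp [hc]

lemma foldA (ls : List String) : ∀ (chunks : List (List String)) (cur : List String),
    (let res := ls.foldl ghcStep (chunks, cur)
     if res.2.isEmpty then res.1 else res.1 ++ [res.2]) =
    chunks ++ (if cur.isEmpty then splitS ls
               else (cur ++ ls.takeWhile (fun x => !isHeader x)) ::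
                    splitS (ls.dropWhile (fun x => !isHeader x))) := by
  induction ls with
  | nil =>
    intro chunks cur
    by_cases hc : cur.isEmpty <;> simp [splitS, hc]
  | cons l t ih =>
    intro chunks cur
    by_cases h : isHeader l
    · rw [List.foldl_cons, ghcStep_header _ _ h, ih]
      simp only [List.isEmpty_cons, if_neg Bool.false_ne_true]
      by_cases hc : cur.isEmpty
      · rw [splitS]
        simp [h, hc]
      · simp only [hc, if_neg Bool.false_ne_true]
        rw [List.takeWhile_cons, List.dropWhile_cons]
        simp only [h, Bool.not_true, if_neg Bool.false_ne_true]
        rw [splitS]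
        simp [h, List.append_assoc]
    · rw [List.foldl_cons, ghcStep_nonheader _ _ (by simpa using h)]
      by_cases hc : cur.isEmpty
      · rw [if_pos hc, ih]
        rw [splitS]
        simp [h, hc]
      · rw [if_neg hc, ih]
        have hne : (cur ++ [l]).isEmpty = false := by simp
        rw [hne, if_neg hc]
        simp only [Bool.false_eq_true, if_false]
        rw [List.takeWhile_cons, List.dropWhile_cons]
        simp [h, List.append_assoc]

lemma a_eq_splitS (lines : List String) : get_glyph_chunks lines = splitS lines := by
  have := foldA lines [] []
  simpa [get_glyph_chunks] using this

-- B equals splitS -----------------------------------------------------------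

-- header indices, natural-number version
def hidxN : List String → List Nat
  | [] => []
  | l :: t => if isHeader l then 0 :: (hidxN t).map (· + 1) else (hidxN t).map (· + 1)

lemma filterMap_enumerate_shift (ls : List String) : ∀ s : Int,
    (PySem.List.enumerate ls s).filterMap (fun p => if isHeader p.2 then some p.1 else none) =
    ((PySem.List.enumerate ls 0).filterMap (fun p => if isHeader p.2 then some p.1 else none)).map (· + s) := by
  induction ls with
  | nil => intro s; simp [PySem.List.enumerate_nil]
  | cons l t ih =>
    intro s
    rw [PySem.List.enumerate_cons, PySem.List.enumerate_cons, List.filterMap_cons, List.filterMap_cons]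
    by_cases h : isHeader l
    · simp only [h, if_true]
      rw [ih (s + 1), ih (0 + 1), List.map_cons, List.map_map]
      congr 1
      · omega
      · congr 1
        funext x; simp; omega
    · simp only [h, Bool.false_eq_true, if_false]
      rw [ih (s + 1), ih (0 + 1), List.map_map]
      congr 1
      funext x; simp; omega

lemma map_intCast_add_one (J : List Nat) :
    (J.map (Nat.cast : Nat → Int)).map (· + 1) = (J.map (· + 1)).map (Nat.cast : Nat → Int) := by
  induction J with
  | nil => rfl
  | cons a J ih => simp only [List.map_cons, ih, Nat.cast_add, Nat.cast_one]

lemma hidx_eq_hidxN (ls : List String) :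
    (PySem.List.enumerate ls).filterMap (fun p => if isHeader p.2 then some p.1 else none) =
    (hidxN ls).map (Nat.cast : Nat → Int) := by
  induction ls with
  | nil => simp [PySem.List.enumerate, hidxN]
  | cons l t ih =>
    show (PySem.List.enumerate (l :: t) 0).filterMap _ = _
    rw [PySem.List.enumerate_cons, List.filterMap_cons]
    rw [filterMap_enumerate_shift t (0 + 1)]
    rw [show (PySem.List.enumerate t 0).filterMap (fun p => if isHeader p.2 then some p.1 else none) =
          (hidxN t).map (Nat.cast : Nat → Int) from ih]
    rw [show ((0 : Int) + 1) = 1 from by norm_num, map_intCast_add_one]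
    by_cases h : isHeader l
    · simp only [h, if_true, hidxN, List.map_cons, Nat.cast_zero]
    · simp only [h, Bool.false_eq_true, if_false, hidxN]

-- natural-number reformulation of port B
def specB (ls : List String) : List (List String) :=
  let J := hidxN ls
  if J = [] then []
  else
    let bd := J ++ [ls.length]
    (bd.zip bd.tail).map (fun p => (ls.drop p.1).take (p.2 - p.1))

lemma altB_eq_specB (ls : List String) : get_glyph_chunks_alt ls = specB ls := by
  simp only [get_glyph_chunks_alt, specB]
  rw [hidx_eq_hidxN]
  by_cases h : hidxN ls = []
  · simp [h]
  · rw [if_neg (by simp [h]), if_neg h]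
    have hmap : (hidxN ls).map (Nat.cast : Nat → Int) ++ [((ls.length : Nat) : Int)] =
        ((hidxN ls) ++ [ls.length]).map (Nat.cast : Nat → Int) := by simp
    rw [hmap, ← List.map_tail, List.zip_map, List.map_map]
    apply List.map_congr_left
    intro p _
    simp [Prod.map, PySem.List.slice_natCast]

lemma hidxN_nil_iff (t : List String) :
    hidxN t = [] ↔ ∀ x ∈ t, isHeader x = false := by
  induction t with
  | nil => simp [hidxN]
  | cons l t ih =>
    by_cases h : isHeader l <;> simp [hidxN, h, ih]

lemma takeWhile_of_all_nonheader (t : List String) (h : ∀ x ∈ t, isHeader x = false) :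
    t.takeWhile (fun x => !isHeader x) = t := by
  induction t with
  | nil => simp
  | cons l t ih =>
    rw [List.takeWhile_cons]
    simp only [h l (by simp), Bool.not_false, if_true]
    rw [ih (fun x hx => h x (by simp [hx]))]

lemma hidxN_head_takeWhile (t : List String) : ∀ i rest, hidxN t = i :: rest →
    t.takeWhile (fun x => !isHeader x) = t.take i := by
  induction t with
  | nil => intro i rest h; simp [hidxN] at h
  | cons l t ih =>
    intro i rest h
    by_cases hl : isHeader l
    · simp only [hidxN, hl, if_true, List.cons.injEq] at h
      simp [hl, ← h.1]
    · simp only [hidxN, hl, Bool.false_eq_true, if_false] at h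
      cases ht : hidxN t with
      | nil => rw [ht] at h; simp at h
      | cons j rest' =>
        rw [ht, List.map_cons] at h
        obtain ⟨rfl, -⟩ := List.cons.injEq .. ▸ h
        rw [List.takeWhile_cons]
        simp only [hl, Bool.not_false, if_true, List.take_succ_cons]
        rw [ih j rest' ht]

lemma shift_chunks (u : List String) (x : String) (B : List Nat) :
    List.map (fun p : Nat × Nat => ((x :: u).drop p.1).take (p.2 - p.1))
      ((B.map (· + 1)).zip ((B.map (· + 1)).tail)) =
    List.map (fun p : Nat × Nat => (u.drop p.1).take (p.2 - p.1)) (B.zip B.tail) := by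
  rw [← List.map_tail, List.zip_map, List.map_map]
  apply List.map_congr_left
  intro p _
  simp [Prod.map, Nat.add_sub_add_right]

lemma zip_zero_map_succ (B : List Nat) (hB : B ≠ []) :
    ((0 : Nat) :: B.map (· + 1)).zip (((0 : Nat) :: B.map (· + 1)).tail) =
    ((0 : Nat), B.head hB + 1) :: (B.map (· + 1)).zip ((B.map (· + 1)).tail) := by
  cases B with
  | nil => simp at hB
  | cons a X => simp

lemma specB_eq_splitS (ls : List String) : specB ls = splitS ls := by
  induction ls with
  | nil => simp [specB, hidxN, splitS]
  | cons l t ih =>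
    by_cases h : isHeader l
    · -- header head
      rw [splitS]; simp only [h, if_true]
      rw [splitS_dropWhile t, ← ih]
      simp only [specB, hidxN, h, if_true, if_neg (List.cons_ne_nil _ _), List.length_cons]
      cases ht : hidxN t with
      | nil =>
        -- no header in t: single chunk l :: t
        have hall := (hidxN_nil_iff t).1 ht
        rw [takeWhile_of_all_nonheader t hall]
        simp [List.take_of_length_le (le_refl t.length)]
      | cons i rest =>
        rw [hidxN_head_takeWhile t i rest ht]
        simp only [if_neg (List.cons_ne_nil _ _)]
        have hbd : List.map (fun x => x + 1) (i :: rest) ++ [t.length + 1] =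
            List.map (fun x => x + 1) (i :: (rest ++ [t.length])) := by simp
        simp only [List.cons_append]
        simp only [hbd]
        rw [zip_zero_map_succ (i :: (rest ++ [t.length])) (by simp), List.map_cons]
        simp only [List.head_cons]
        congr 1
        simpa using shift_chunks t l (i :: (rest ++ [t.length]))
    · -- non-header head: chunks of l::t are the chunks of t, shifted
      rw [splitS]; simp only [h, Bool.false_eq_true, if_false]
      rw [← ih]
      simp only [specB, hidxN, h, Bool.false_eq_true, if_false, List.map_eq_nil_iff,
        List.length_cons]
      by_cases ht : hidxN t = []
      · simp [ht]
      · rw [if_neg ht, if_neg ht]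
        have hbd : ((hidxN t).map (· + 1) ++ [t.length + 1]) =
            (hidxN t ++ [t.length]).map (· + 1) := by simp
        rw [hbd, shift_chunks]

-- ===== VERDICT (by name: the statement is the Claim_ definition above) =====
theorem get_glyph_chunks_spec : Claim_equal_get_glyph_chunks := by
  intro lines _
  unfold Spec_get_glyph_chunks
  rw [a_eq_splitS, altB_eq_specB, specB_eq_splitS]
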